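-- pv_equiv track=rewrite | github.com/mohamedisakr/coding-interview-patterns | two_pointers/remove_all_key_instances.py | remove_all_key_instances
-- ===== SOURCE A (Python) =====
-- def remove_all_key_instances(arr, key):
--     if len(arr) == 0:
--         raise ValueError("arr must not be empty")
--
--     next_item = 0
--
--     for i, item in enumerate(arr):
--         if arr[i] != key:
--             arr[next_item] = arr[i]
--             next_item += 1
--
--     return next_item
-- ===== SOURCE B (Python) =====
-- def remove_all_key_instances(arr, key):
--     if len(arr) == 0:
--         raise ValueError("arr must not be empty")
--     return len(arr) - arr.count(key)
-- ===== Notes on version B (the rewrite author's own statement) =====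
-- stated objective: simpler
-- what changed: Replaces the compacting write loop by pure arithmetic: count the occurrences of key once (C-level list.count) and return len(arr) - count, building nothing and writing nothing; unlike A it does not mutate arr (return-value equivalence only).
import Mathlib
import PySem

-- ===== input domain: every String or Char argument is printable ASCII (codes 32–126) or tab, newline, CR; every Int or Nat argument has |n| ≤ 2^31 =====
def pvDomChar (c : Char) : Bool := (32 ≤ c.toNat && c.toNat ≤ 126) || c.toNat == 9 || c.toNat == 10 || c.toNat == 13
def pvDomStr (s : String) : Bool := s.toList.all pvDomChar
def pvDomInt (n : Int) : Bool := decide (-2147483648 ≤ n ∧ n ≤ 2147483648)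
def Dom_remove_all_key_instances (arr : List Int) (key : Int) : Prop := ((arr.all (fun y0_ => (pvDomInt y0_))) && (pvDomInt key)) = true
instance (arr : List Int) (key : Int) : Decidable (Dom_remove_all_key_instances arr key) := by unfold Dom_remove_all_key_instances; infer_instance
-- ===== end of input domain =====

-- B replaces A's compacting write loop by pure arithmetic (len minus count of key); B performs no mutation, so the equivalence proved is about the RETURN value only.
-- ===== PORT A =====
-- Loop state mirrors Python's live list plus next_item; arr[i] read via pyGet? (always in range here, so getD 0 is never taken), arr[next_item] write via List.set.
def pvStepA (key : Int) (st : List Int × Nat) (i : Nat) : List Int × Nat :=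
  if ((PySem.List.pyGet? st.1 (i : Int)).getD 0) ≠ key then
    (st.1.set st.2 ((PySem.List.pyGet? st.1 (i : Int)).getD 0), st.2 + 1)
  else st

def remove_all_key_instances (arr : List Int) (key : Int) : Int :=
  if arr.length = 0 then 0  -- Python raises ValueError here; excluded by Pre_
  else (((List.range arr.length).foldl (pvStepA key) (arr, 0)).2 : Int)

-- ===== PORT B =====
def remove_all_key_instances_alt (arr : List Int) (key : Int) : Int :=
  if arr.length = 0 then 0  -- Python raises ValueError here; excluded by Pre_
  else (arr.length : Int) - (PySem.List.count arr key : Int)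

-- ===== PRECONDITION & SPEC =====
-- Pre_ excludes exactly the empty list, on which both Pythons raise ValueError.
def Pre_remove_all_key_instances (arr : List Int) (key : Int) : Prop := arr ≠ []
instance (arr : List Int) (key : Int) : Decidable (Pre_remove_all_key_instances arr key) := by unfold Pre_remove_all_key_instances; infer_instance
def pvWitness_remove_all_key_instances : List Int × Int := ([1, 2, 3, 2], 2)
def Spec_remove_all_key_instances (arr : List Int) (key : Int) (out : Int) : Prop := out = remove_all_key_instances_alt arr key
instance (arr : List Int) (key : Int) (out : Int) : Decidable (Spec_remove_all_key_instances arr key out) := by unfold Spec_remove_all_key_instances; infer_instance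

-- ===== CLAIM (what is proved, stated in full; the proofs are below) =====
def Claim_equal_remove_all_key_instances : Prop := ∀ (arr : List Int) (key : Int), Dom_remove_all_key_instances arr key → Pre_remove_all_key_instances arr key → Spec_remove_all_key_instances arr key (remove_all_key_instances arr key)

-- ===== LEMMAS AND PROOFS =====
-- Loop invariant for A's scan: the suffix from i on is still the original array,
-- so the counter ends at (count of elements ≠ key in that suffix) plus n.
lemma pvLoopA_inv (key : Int) (arr : List Int) :
    ∀ (m i : Nat) (l : List Int) (n : Nat), i + m = arr.length →
      l.length = arr.length → n ≤ i → l.drop i = arr.drop i →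
      (((List.range' i m).foldl (pvStepA key) (l, n)).2 : Nat)
        = n + (arr.drop i).countP (fun x => x != key) := by
  intro m
  induction m with
  | zero =>
      intro i l n him hlen hni hdrop
      have : arr.drop i = [] := by
        have : arr.length ≤ i := by omega
        simp [List.drop_eq_nil_of_le this]
      simp [this]
  | succ m ih =>
      intro i l n him hlen hni hdrop
      have hi : i < arr.length := by omega
      have hil : i < l.length := by omega
      have hget : l[i]? = some arr[i] := by
        have h0 : l[i]? = (l.drop i)[0]? := by
          simp [List.getElem?_drop]
        rw [h0, hdrop]
        simp [List.getElem?_drop, hi]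
      have hstep : pvStepA key (l, n) i =
          if arr[i] ≠ key then (l.set n arr[i], n + 1) else (l, n) := by
        simp [pvStepA, hget]
      have hdropsucc : l.drop (i+1) = arr.drop (i+1) := by
        have h1 : l.drop (i+1) = (l.drop i).drop 1 := by
          rw [List.drop_drop]
        have h2 : arr.drop (i+1) = (arr.drop i).drop 1 := by
          rw [List.drop_drop]
        rw [h1, h2, hdrop]
      have hcons : arr.drop i = arr[i] :: arr.drop (i+1) :=
        List.drop_eq_getElem_cons hi
      rw [List.range'_succ, List.foldl_cons, hstep]
      by_cases hk : arr[i] ≠ key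
      · rw [if_pos hk]
        have := ih (i+1) (l.set n arr[i]) (n+1) (by omega) (by simp [hlen]) (by omega)
          (by
            have : (l.set n arr[i]).drop (i+1) = l.drop (i+1) := by
              apply List.ext_getElem
              · simp
              · intro j h1 h2
                simp only [List.getElem_drop, List.getElem_set]
                rw [if_neg (by omega)]
            rw [this, hdropsucc])
        rw [this, hcons, List.countP_cons]
        have hb : (arr[i] != key) = true := by simpa using hk
        rw [hb]
        simp
        omega
      · rw [if_neg hk]
        have := ih (i+1) l n (by omega) hlen (by omega) hdropsucc
        rw [this, hcons, List.countP_cons]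
        have hb : (arr[i] != key) = false := by simpa using hk
        rw [hb]
        simp

-- Counting complement: elements ≠ key plus elements = key partition the list.
lemma pvCount_split (arr : List Int) (key : Int) :
    arr.countP (fun x => x != key) + arr.count key = arr.length := by
  induction arr with
  | nil => simp
  | cons a t ih =>
      by_cases h : a = key
      · simp [List.countP_cons, List.count_cons, h] at *; omega
      · simp [List.countP_cons, List.count_cons, h, Ne.symm h] at *; omega

-- ===== VERDICT (by name: the statement is the Claim_ definition above) =====
theorem remove_all_key_instances_spec : Claim_equal_remove_all_key_instances := by
  intro arr key _ hpre
  unfold Spec_remove_all_key_instances remove_all_key_instances remove_all_key_instances_alt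
  have hne : arr.length ≠ 0 := by simpa [List.length_eq_zero_iff] using hpre
  rw [if_neg hne, if_neg hne]
  have h := pvLoopA_inv key arr arr.length 0 arr 0 (by omega) rfl (Nat.le_refl 0) rfl
  rw [List.range_eq_range', h]
  have hs := pvCount_split arr key
  simp only [List.drop_zero, PySem.List.count_eq]
  omega
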